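-- pv_equiv track=rewrite | github.com/YoussefMohamed-joe/python-projects | day8/day9/day9_1/task2_5.py | lognestSub
-- ===== SOURCE A (Python) =====
-- def lognestSub(message):
--     longest = ""
--     alpha = "abcdefghijklmnopqrstuvwxyz"
--     for i in message:
--         for j in alpha:
--             if i == j:
--                 longest += i
--                 for k in range(alpha.index(i), -1,-1):
--                     alpha = alpha.replace(alpha[k], "")
--     return longest
-- ===== SOURCE B (Python) =====
-- LOWER = "abcdefghijklmnopqrstuvwxyz"
--
-- def lognestSub(message):
--     longest = ""
--     for c in message:
--         if c in LOWER and (not longest or c > longest[-1]):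
--             longest += c
--     return longest
-- ===== Notes on version B (the rewrite author's own statement) =====
-- stated objective: simpler
-- what changed: Replaced the nested scan over a shrinking alphabet string (with an inner index/replace removal loop) by a single pass that keeps a lowercase character exactly when it is strictly greater than the last kept one.
import Mathlib
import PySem

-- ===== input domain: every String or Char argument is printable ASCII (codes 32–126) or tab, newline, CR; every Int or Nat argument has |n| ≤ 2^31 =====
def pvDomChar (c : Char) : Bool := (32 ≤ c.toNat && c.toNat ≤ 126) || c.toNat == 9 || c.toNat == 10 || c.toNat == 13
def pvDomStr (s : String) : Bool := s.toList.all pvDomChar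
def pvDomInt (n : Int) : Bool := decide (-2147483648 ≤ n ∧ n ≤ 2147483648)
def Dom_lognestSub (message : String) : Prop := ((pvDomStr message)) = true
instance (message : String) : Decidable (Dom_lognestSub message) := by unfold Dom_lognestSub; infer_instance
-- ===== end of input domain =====

-- B replaces A's nested scans over a shrinking alphabet string by a single pass keeping each
-- lowercase char strictly greater than the last kept one (simpler, fewer passes).
-- Strings are represented as List Char inside the folds (the PySem string representation);
-- the results are converted back with String.ofList.

-- ===== PORT A =====
-- alpha = "abcdefghijklmnopqrstuvwxyz"
def pvAlphaA : List Char := ['a','b','c','d','e','f','g','h','i','j','k','l','m','n','o','p','q','r','s','t','u','v','w','x','y','z']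

-- inner loop body of A: 'for j in alpha: if i == j: longest += i; for k in range(alpha.index(i),-1,-1): alpha = alpha.replace(alpha[k], "")'
-- ('for j' iterates over the snapshot st.2 taken at loop entry, as Python does on a string;
--  alpha.index(i) is reached only with i present in alpha, where .index = .find)
def pvStepA (i : Char) (st : List Char × List Char) : List Char × List Char :=
  st.2.foldl
    (fun st' j =>
      if i == j then
        let longest := st'.1 ++ [i]
        let alpha :=
          (PySem.List.pyRange (PySem.Chars.find st'.2 [i]) (-1) (-1)).foldl
            (fun a k =>
              match PySem.List.pyGet? a k with  -- alpha[k]; none = IndexError, unreachable (k is a valid index)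
              | some c => PySem.Chars.replace a [c] []
              | none => a)
            st'.2
        (longest, alpha)
      else st')
    st

def lognestSub (message : String) : String :=
  String.ofList (message.toList.foldl (fun st i => pvStepA i st) ([], pvAlphaA)).1

-- ===== PORT B =====
-- LOWER = "abcdefghijklmnopqrstuvwxyz"
def pvLowerB : List Char := ['a','b','c','d','e','f','g','h','i','j','k','l','m','n','o','p','q','r','s','t','u','v','w','x','y','z']

-- loop body of B: 'if c in LOWER and (not longest or c > longest[-1]): longest += c'
def pvStepB (longest : List Char) (c : Char) : List Char :=
  if PySem.Chars.isIn [c] pvLowerB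
      && (longest.isEmpty
          || (match PySem.List.pyGet? longest (-1) with  -- longest[-1], evaluated only when longest is nonempty
              | some m => decide (m < c)
              | none => false)) then
    longest ++ [c]
  else longest

def lognestSub_alt (message : String) : String :=
  String.ofList (message.toList.foldl (fun longest c => pvStepB longest c) [])

-- ===== PRECONDITION & SPEC =====
def Spec_lognestSub (message : String) (out : String) : Prop := out = lognestSub_alt message
instance (message : String) (out : String) : Decidable (Spec_lognestSub message out) := by unfold Spec_lognestSub; infer_instance

-- ===== CLAIM (what is proved, stated in full; the proofs are below) =====
def Claim_equal_lognestSub : Prop := ∀ (message : String), Dom_lognestSub message → Spec_lognestSub message (lognestSub message)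

-- ===== LEMMAS AND PROOFS =====

-- alpha after the first n letters have been discarded; the last kept letter at that state; the next state
def pvLastc (n : Nat) : Option Char := if n = 0 then none else pvAlphaA[n-1]?
def pvNext (n : Nat) (i : Char) : Nat :=
  if i ∈ pvAlphaA.drop n then pvAlphaA.idxOf i + 1 else n

-- the finite table of facts about one step of A on each reachable alpha, checked by computation
set_option maxRecDepth 4000 in
theorem pvKey_holds : ∀ n ∈ List.range 27, ∀ i ∈ pvAlphaA,
    pvNext n i ≤ 26 ∧
    pvStepA i ([], pvAlphaA.drop n)
      = ((if i ∈ pvAlphaA.drop n then [i] else []), pvAlphaA.drop (pvNext n i)) ∧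
    (decide (i ∈ pvAlphaA.drop n) = (pvLastc n).all (fun m => decide (m < i))) ∧
    (pvLastc (pvNext n i) = if i ∈ pvAlphaA.drop n then some i else pvLastc n) := by
  intro n hn i hi
  fin_cases hn <;> fin_cases hi <;> decide

-- the inner loop only appends to the first component, so the accumulator factors out
theorem pvStepA_factor (i : Char) (l α : List Char) :
    pvStepA i (l, α) = (l ++ (pvStepA i ([], α)).1, (pvStepA i ([], α)).2) := by
  suffices h : ∀ (js l α : List Char),
      List.foldl
        (fun st' j =>
          if i == j then
            let longest := st'.1 ++ [i]
            let alpha :=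
              (PySem.List.pyRange (PySem.Chars.find st'.2 [i]) (-1) (-1)).foldl
                (fun a k =>
                  match PySem.List.pyGet? a k with
                  | some c => PySem.Chars.replace a [c] []
                  | none => a)
                st'.2
            (longest, alpha)
          else st')
        (l, α) js
      = (l ++ (List.foldl
          (fun st' j =>
            if i == j then
              let longest := st'.1 ++ [i]
              let alpha :=
                (PySem.List.pyRange (PySem.Chars.find st'.2 [i]) (-1) (-1)).foldl
                  (fun a k =>
                    match PySem.List.pyGet? a k with
                    | some c => PySem.Chars.replace a [c] []
                    | none => a)
                  st'.2
              (longest, alpha)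
            else st')
          ([], α) js).1,
        (List.foldl
          (fun st' j =>
            if i == j then
              let longest := st'.1 ++ [i]
              let alpha :=
                (PySem.List.pyRange (PySem.Chars.find st'.2 [i]) (-1) (-1)).foldl
                  (fun a k =>
                    match PySem.List.pyGet? a k with
                    | some c => PySem.Chars.replace a [c] []
                    | none => a)
                  st'.2
              (longest, alpha)
            else st')
          ([], α) js).2) by
    exact h α l α
  intro js
  induction js with
  | nil => intro l α; simp
  | cons j js ih =>
    intro l α
    simp only [List.foldl_cons]
    by_cases h : i == j
    · simp only [if_pos h]
      rw [ih, ih ([] ++ [i])]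
      simp [List.append_assoc]
    · simp only [if_neg h]
      exact ih l α

-- if i never occurs in the snapshot, the inner loop is the identity
theorem pvStepA_notmem (i : Char) (l α : List Char) (h : i ∉ α) :
    pvStepA i (l, α) = (l, α) := by
  unfold pvStepA
  suffices h' : ∀ (js : List Char) (st : List Char × List Char), (∀ j ∈ js, ¬ i = j) →
      List.foldl
        (fun st' j =>
          if i == j then
            let longest := st'.1 ++ [i]
            let alpha :=
              (PySem.List.pyRange (PySem.Chars.find st'.2 [i]) (-1) (-1)).foldl
                (fun a k =>
                  match PySem.List.pyGet? a k with
                  | some c => PySem.Chars.replace a [c] []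
                  | none => a)
                st'.2
            (longest, alpha)
          else st')
        st js = st by
    exact h' _ _ (fun j hj he => h (he ▸ hj))
  intro js
  induction js with
  | nil => intro st _; rfl
  | cons j js ih =>
    intro st hj
    simp only [List.foldl_cons]
    rw [if_neg (by simpa using hj j (by simp))]
    exact ih st (fun j' hj' => hj j' (by simp [hj']))

theorem pvStepB_eq (l : List Char) (i : Char) (n : Nat) (hn : n ≤ 26)
    (hi : i ∈ pvAlphaA) (hl : l.getLast? = pvLastc n) :
    pvStepB l i = l ++ (if i ∈ pvAlphaA.drop n then [i] else []) := by
  obtain ⟨-, -, hcond, -⟩ := pvKey_holds n (by simp; omega) i hi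
  have hin : PySem.Chars.isIn [i] pvLowerB = true := by
    rw [PySem.Chars.isIn_iff_infix, List.singleton_infix_iff]
    exact hi
  unfold pvStepB
  rw [hin]
  cases hmc : pvLastc n with
  | none =>
    rw [hmc] at hl
    have hnil : l = [] := by
      cases l with
      | nil => rfl
      | cons a as => simp [List.getLast?] at hl
    have hk : i ∈ pvAlphaA.drop n := by
      have h2 := hcond; rw [hmc] at h2; simpa using h2
    simp [hnil, hk]
  | some m =>
    rw [hmc] at hl
    have hne : l.isEmpty = false := by
      cases l with
      | nil => simp [List.getLast?] at hl
      | cons a as => rfl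
    have hget : PySem.List.pyGet? l (-1) = some m := by
      rw [PySem.List.pyGet?_neg_one, hl]
    have hma : decide (i ∈ pvAlphaA.drop n) = decide (m < i) := by
      rw [hcond, hmc]; simp
    rw [hne, hget]
    simp only [Bool.true_and, Bool.false_or]
    by_cases hk : i ∈ pvAlphaA.drop n
    · have hmi : m < i := by
        have h2 : decide (m < i) = true := by rw [← hma]; exact decide_eq_true hk
        exact of_decide_eq_true h2
      simp [hk, hmi]
    · have hmi : ¬ m < i := by
        intro hlt
        exact hk (of_decide_eq_true (by rw [hma]; exact decide_eq_true hlt))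
      simp [hk, hmi]

theorem pvLoop_eq : ∀ (ms : List Char) (l : List Char) (n : Nat), n ≤ 26 →
    l.getLast? = pvLastc n →
    (ms.foldl (fun st i => pvStepA i st) (l, pvAlphaA.drop n)).1
      = ms.foldl (fun longest c => pvStepB longest c) l := by
  intro ms
  induction ms with
  | nil => intro l n _ _; rfl
  | cons i ms ih =>
    intro l n hn hl
    simp only [List.foldl_cons]
    by_cases hi : i ∈ pvAlphaA
    · obtain ⟨hn', hstep, -, hlast⟩ := pvKey_holds n (by simp; omega) i hi
      rw [pvStepA_factor, hstep]
      rw [pvStepB_eq l i n hn hi hl]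
      apply ih _ (pvNext n i) hn'
      rw [hlast]
      by_cases hk : i ∈ pvAlphaA.drop n
      · simp [hk]
      · simpa [hk] using hl
    · -- i is not a lowercase letter: both sides leave the state unchanged
      have hnd : i ∉ pvAlphaA.drop n := fun h => hi (List.drop_subset _ _ h)
      rw [pvStepA_notmem i l _ hnd]
      have hb : pvStepB l i = l := by
        have hin : PySem.Chars.isIn [i] pvLowerB = false := by
          apply Bool.eq_false_iff.mpr
          intro h
          rw [PySem.Chars.isIn_iff_infix, List.singleton_infix_iff] at h
          exact hi h
        unfold pvStepB
        rw [hin]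
        simp
      rw [hb]
      exact ih l n hn hl

-- ===== VERDICT (by name: the statement is the Claim_ definition above) =====
theorem lognestSub_spec : Claim_equal_lognestSub := by
  intro message _
  unfold Spec_lognestSub lognestSub lognestSub_alt
  have h0 : pvAlphaA = pvAlphaA.drop 0 := rfl
  rw [h0]
  exact congrArg String.ofList
    (pvLoop_eq message.toList [] 0 (by omega) (by rfl))
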